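-- pv_equiv track=rewrite | github.com/acezxn/Grouping-optimization | grouping_serv/apps/accounts/multi_regression.py | check_violation
-- ===== SOURCE A (Python) =====
-- def check_violation(rule, groups):
--     violated = False
--     for g in groups:
--         if violated:
--             break
--         for r in rule:
--             if r[0] in g and r[1] in g:
--                 violated = True
--                 break
--     return violated
-- ===== SOURCE B (Python) =====
-- def check_violation(rule, groups):
--     index = {}
--     for i, g in enumerate(groups):
--         for x in g:
--             index.setdefault(x, set()).add(i)
--     for r in rule:
--         if index.get(r[0], set()) & index.get(r[1], set()):
--             return True
--     return False
-- ===== Notes on version B (the rewrite author's own statement) =====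
-- stated objective: alternative
-- what changed: Instead of re-scanning every group per rule with nested membership tests, B builds an inverted index (element -> set of group indices) in one pass over the groups and then decides each rule by intersecting the two index sets.
-- outside the precondition, e.g. on check_violation([[1]], []): A returns False, B raises IndexError
import Mathlib
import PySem

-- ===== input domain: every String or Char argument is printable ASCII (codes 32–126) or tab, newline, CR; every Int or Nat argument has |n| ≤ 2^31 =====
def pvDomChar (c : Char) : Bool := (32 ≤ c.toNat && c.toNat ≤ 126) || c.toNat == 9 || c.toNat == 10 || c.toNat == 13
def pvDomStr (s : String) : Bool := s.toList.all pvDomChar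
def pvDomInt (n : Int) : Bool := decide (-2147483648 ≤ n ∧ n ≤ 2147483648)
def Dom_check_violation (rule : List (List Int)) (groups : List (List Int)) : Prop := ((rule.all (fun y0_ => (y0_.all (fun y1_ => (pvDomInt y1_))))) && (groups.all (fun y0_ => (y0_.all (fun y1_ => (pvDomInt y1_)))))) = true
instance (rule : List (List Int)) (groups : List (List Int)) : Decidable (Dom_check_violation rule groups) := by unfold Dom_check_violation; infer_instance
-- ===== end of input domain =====

-- B replaces A's nested group×rule membership scans by an inverted index (element -> set of
-- group indices) built once, deciding each rule by intersecting two index sets (objective: alternative).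


-- ===== PORT A =====
-- inner 'for r in rule' loop: stops (violated) at the first r with r[0] in g and r[1] in g
def cvInner (g : List Int) : List (List Int) → Bool
  | [] => false
  | r :: rest =>
    if g.contains (PySem.List.pyGetD r 0 0) && g.contains (PySem.List.pyGetD r 1 0) then true
    else cvInner g rest

-- outer 'for g in groups' loop with the 'if violated: break' check at the top
def cvOuter (rule : List (List Int)) : List (List Int) → Bool
  | [] => false
  | g :: gs => if cvInner g rule then true else cvOuter rule gs

def check_violation (rule : List (List Int)) (groups : List (List Int)) : Bool :=
  cvOuter rule groups

-- ===== PORT B =====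
-- index.setdefault(x, set()).add(i) for every i, g in enumerate(groups), x in g
def cvIndex (groups : List (List Int)) : PySem.Dict Int (PySem.Set Int) :=
  (PySem.List.enumerate groups 0).foldl
    (fun d p => p.2.foldl (fun d x => d.modify x PySem.Set.empty (fun s => PySem.Set.add s p.1)) d)
    PySem.Dict.empty

-- 'for r in rule: if index.get(r[0], set()) & index.get(r[1], set()): return True'
def cvRules (idx : PySem.Dict Int (PySem.Set Int)) : List (List Int) → Bool
  | [] => false
  | r :: rest =>
    if PySem.Set.inter (idx.getD (PySem.List.pyGetD r 0 0) PySem.Set.empty)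
                       (idx.getD (PySem.List.pyGetD r 1 0) PySem.Set.empty) ≠ [] then true
    else cvRules idx rest

def check_violation_alt (rule : List (List Int)) (groups : List (List Int)) : Bool :=
  cvRules (cvIndex groups) rule

-- ===== PRECONDITION & SPEC =====
-- Pre_ excludes rules shorter than 2 elements: on those Python A raises IndexError whenever such a
-- rule's r[0] (and, for length-1 rules, r[1] after an r[0] hit) is evaluated; on the remaining such
-- inputs A happens to return (e.g. empty groups) but B naturally raises, so they stay excluded.
def Pre_check_violation (rule : List (List Int)) (groups : List (List Int)) : Prop :=
  ∀ r ∈ rule, 2 ≤ r.length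
instance (rule : List (List Int)) (groups : List (List Int)) : Decidable (Pre_check_violation rule groups) := by unfold Pre_check_violation; infer_instance

def pvWitness_check_violation : List (List Int) × List (List Int) := ([[1, 2]], [[1, 3], [2, 1]])

def Spec_check_violation (rule : List (List Int)) (groups : List (List Int)) (out : Bool) : Prop := out = check_violation_alt rule groups
instance (rule : List (List Int)) (groups : List (List Int)) (out : Bool) : Decidable (Spec_check_violation rule groups out) := by unfold Spec_check_violation; infer_instance

-- ===== CLAIM (what is proved, stated in full; the proofs are below) =====
def Claim_equal_check_violation : Prop := ∀ (rule : List (List Int)) (groups : List (List Int)), Dom_check_violation rule groups → Pre_check_violation rule groups → Spec_check_violation rule groups (check_violation rule groups)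

-- ===== LEMMAS AND PROOFS =====

theorem cvInner_eq_any (g : List Int) (rs : List (List Int)) :
    cvInner g rs = rs.any (fun r => g.contains (PySem.List.pyGetD r 0 0) && g.contains (PySem.List.pyGetD r 1 0)) := by
  induction rs with
  | nil => rfl
  | cons r rest ih => simp [cvInner, ih]

theorem cvOuter_eq_any (rule gs : List (List Int)) :
    cvOuter rule gs = gs.any (fun g => cvInner g rule) := by
  induction gs with
  | nil => rfl
  | cons g rest ih => simp [cvOuter, ih]

theorem cvRules_eq_any (idx : PySem.Dict Int (PySem.Set Int)) (rs : List (List Int)) :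
    cvRules idx rs = rs.any (fun r =>
      decide (PySem.Set.inter (idx.getD (PySem.List.pyGetD r 0 0) PySem.Set.empty)
                              (idx.getD (PySem.List.pyGetD r 1 0) PySem.Set.empty) ≠ [])) := by
  induction rs with
  | nil => rfl
  | cons r rest ih =>
    simp only [cvRules, List.any_cons, ← ih]
    split_ifs with h <;> simp [PySem.Set.empty] at h ⊢ <;> simp [h]

theorem mem_getD_inner (g : List Int) (j : Int) (d : PySem.Dict Int (PySem.Set Int)) (y i : Int) :
    (i ∈ (g.foldl (fun d x => d.modify x PySem.Set.empty (fun s => PySem.Set.add s j)) d).getD y PySem.Set.empty)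
      ↔ (i ∈ d.getD y PySem.Set.empty ∨ (y ∈ g ∧ i = j)) := by
  induction g generalizing d with
  | nil => simp
  | cons x xs ih =>
    simp only [List.foldl_cons, ih, PySem.Dict.getD_modify]
    by_cases hxy : y = x
    · subst hxy
      simp only [if_true, PySem.Set.mem_add, List.mem_cons]
      tauto
    · rw [if_neg hxy]
      simp only [List.mem_cons]
      tauto

-- membership in the inverted index: i is an index of a group (counted from s) containing y
theorem mem_getD_enum_foldl (gs : List (List Int)) (s : Int) (d : PySem.Dict Int (PySem.Set Int)) (y i : Int) :
    (i ∈ ((PySem.List.enumerate gs s).foldl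
        (fun d p => p.2.foldl (fun d x => d.modify x PySem.Set.empty (fun s' => PySem.Set.add s' p.1)) d) d).getD y PySem.Set.empty)
      ↔ (i ∈ d.getD y PySem.Set.empty ∨ ∃ k : Nat, ∃ h : k < gs.length, i = s + k ∧ y ∈ gs[k]) := by
  induction gs generalizing s d with
  | nil => simp [PySem.List.enumerate_nil]
  | cons g rest ih =>
    rw [PySem.List.enumerate_cons]
    simp only [List.foldl_cons, ih, mem_getD_inner]
    constructor
    · rintro (⟨h | ⟨hy, hi⟩⟩ | ⟨k, hk, hi, hy⟩)
      · exact Or.inl h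
      · exact Or.inr ⟨0, by simp, by simp [hi], by simpa⟩
      · exact Or.inr ⟨k + 1, by simpa using hk, by push_cast at hi ⊢; omega, by simpa using hy⟩
    · rintro (h | ⟨k, hk, hi, hy⟩)
      · exact Or.inl (Or.inl h)
      · cases k with
        | zero => exact Or.inl (Or.inr ⟨by simpa using hy, by simpa using hi⟩)
        | succ k => exact Or.inr ⟨k, by simpa using hk, by push_cast at hi ⊢; omega, by simpa using hy⟩

theorem mem_cvIndex (groups : List (List Int)) (y i : Int) :
    (i ∈ (cvIndex groups).getD y PySem.Set.empty)
      ↔ ∃ k : Nat, ∃ h : k < groups.length, i = (k : Int) ∧ y ∈ groups[k] := by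
  unfold cvIndex
  rw [mem_getD_enum_foldl]
  simp [PySem.Dict.getD_empty, PySem.Set.empty]

theorem inter_ne_nil_iff (s t : PySem.Set Int) :
    PySem.Set.inter s t ≠ [] ↔ ∃ i, i ∈ s ∧ i ∈ t := by
  rw [← List.isEmpty_eq_false_iff, List.isEmpty_eq_false_iff_exists_mem]
  constructor
  · rintro ⟨i, hi⟩; exact ⟨i, (PySem.Set.mem_inter _ _ _).1 hi⟩
  · rintro ⟨i, hs, ht⟩; exact ⟨i, (PySem.Set.mem_inter _ _ _).2 ⟨hs, ht⟩⟩

-- ===== VERDICT (by name: the statement is the Claim_ definition above) =====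
theorem check_violation_spec : Claim_equal_check_violation := by
  intro rule groups _hdom _hpre
  unfold Spec_check_violation
  unfold check_violation check_violation_alt
  rw [cvOuter_eq_any, cvRules_eq_any, Bool.eq_iff_iff]
  simp only [List.any_eq_true, cvInner_eq_any, Bool.and_eq_true, List.contains_iff_mem]
  constructor
  · rintro ⟨g, hg, r, hr, h0, h1⟩
    obtain ⟨k, hk, hgk⟩ := List.mem_iff_getElem.1 hg
    refine ⟨r, hr, ?_⟩
    rw [decide_eq_true_iff, inter_ne_nil_iff]
    exact ⟨(k : Int), (mem_cvIndex _ _ _).2 ⟨k, hk, rfl, hgk ▸ h0⟩,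
           (mem_cvIndex _ _ _).2 ⟨k, hk, rfl, hgk ▸ h1⟩⟩
  · rintro ⟨r, hr, h⟩
    rw [decide_eq_true_iff, inter_ne_nil_iff] at h
    obtain ⟨i, h0, h1⟩ := h
    obtain ⟨k, hk, hik, h0⟩ := (mem_cvIndex _ _ _).1 h0
    obtain ⟨k', hk', hik', h1⟩ := (mem_cvIndex _ _ _).1 h1
    have : k = k' := by omega
    subst this
    exact ⟨groups[k], List.getElem_mem hk, r, hr, h0, h1⟩
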